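-- pv_equiv track=rewrite | github.com/Dei1400/Dei1400 | Portafolio2_DeilySalazar2020426180/9_listaParEImpar.py | verificarListaAux
-- ===== SOURCE A (Python) =====
-- def verificarListaAux(lista, pos):
--      if largoLista(lista) == pos :
--           return True
--      else:
--           if (isinstance(lista[pos], int) or isinstance(lista[pos], float)) and lista[pos] > 0 :
--                return verificarListaAux(lista, pos+1)
--           else:
--                return False
--
-- def largoLista(lista):
--      if isinstance(lista, list):
--           return largoListaAux(lista, 0)
--      else:
--           return -1
--
-- def largoListaAux(lista, largo):
--      if lista == [] :
--           return largo
--      else: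
--           return largoListaAux(lista[1:], largo+1)
-- ===== SOURCE B (Python) =====
-- def verificarListaAux(lista, pos):
--     # Positivity check of the suffix from pos (negative pos wraps, so the
--     # whole list is covered): one slice + all(), no recursion.
--     start = pos if pos >= 0 else 0
--     return all(x > 0 for x in lista[start:])
-- ===== Notes on version B (the rewrite author's own statement) =====
-- stated objective: simpler
-- what changed: Replaces the triple mutual recursion (element check recursing on pos, plus a recursive slicing length computation) with a single slice-and-all expression: start = max(pos, 0), then all(x > 0 for x in lista[start:]).
import Mathlib
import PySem

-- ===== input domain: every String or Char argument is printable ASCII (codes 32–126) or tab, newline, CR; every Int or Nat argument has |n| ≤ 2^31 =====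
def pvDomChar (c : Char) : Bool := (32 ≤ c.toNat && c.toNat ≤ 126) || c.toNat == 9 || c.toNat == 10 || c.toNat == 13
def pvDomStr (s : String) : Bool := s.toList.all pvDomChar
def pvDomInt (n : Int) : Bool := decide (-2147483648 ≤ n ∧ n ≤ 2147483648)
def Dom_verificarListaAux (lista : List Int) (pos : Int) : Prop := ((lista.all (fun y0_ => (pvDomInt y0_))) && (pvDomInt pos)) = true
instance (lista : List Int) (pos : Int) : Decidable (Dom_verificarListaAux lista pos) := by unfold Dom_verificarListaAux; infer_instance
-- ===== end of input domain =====

-- B replaces A's mutual recursion (and its recursive length computation) by one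
-- clamped slice plus an all(): objective 'simpler'.

-- ===== PORT A =====
-- largoListaAux(lista, largo): recursive length via slicing lista[1:]
def largoListaAux : List Int → Int → Int
  | [], largo => largo
  | _ :: t, largo => largoListaAux t (largo + 1)

-- largoLista: the isinstance(lista, list) branch is always taken (input is a list)
def largoLista (lista : List Int) : Int := largoListaAux lista 0

-- the isinstance(int/float) test on lista[pos] is always true on List Int;
-- pyGet? = none is where Python raises IndexError (excluded by Pre_)
def verificarListaAux (lista : List Int) (pos : Int) : Bool :=
  if largoLista lista = pos then true
  else
    match h : PySem.List.pyGet? lista pos with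
    | none => false
    | some x =>
      if x > 0 then verificarListaAux lista (pos + 1) else false
termination_by (lista.length - pos).toNat
decreasing_by
  have hlt : pos < (lista.length : Int) := by
    have := (PySem.List.pyGet?_eq_none_iff (xs := lista) (i := pos))
    by_cases hr : PySem.Raise.InRange lista.length pos
    · unfold PySem.Raise.InRange at hr; omega
    · simp [this.mpr hr] at h
  omega

-- ===== PORT B =====
def verificarListaAux_alt (lista : List Int) (pos : Int) : Bool :=
  let start : Int := if pos ≥ 0 then pos else 0
  (PySem.List.slice lista (some start) none).all (fun x => decide (0 < x))

-- ===== PRECONDITION & SPEC =====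
-- Pre_: exactly the inputs where A returns (otherwise lista[pos] raises IndexError)
def Pre_verificarListaAux (lista : List Int) (pos : Int) : Prop :=
  -(lista.length : Int) ≤ pos ∧ pos ≤ (lista.length : Int)
instance (lista : List Int) (pos : Int) : Decidable (Pre_verificarListaAux lista pos) := by
  unfold Pre_verificarListaAux; infer_instance

def pvWitness_verificarListaAux : List Int × Int := ([2, 3, -1], 1)

def Spec_verificarListaAux (lista : List Int) (pos : Int) (out : Bool) : Prop := out = verificarListaAux_alt lista pos
instance (lista : List Int) (pos : Int) (out : Bool) : Decidable (Spec_verificarListaAux lista pos out) := by unfold Spec_verificarListaAux; infer_instance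

-- ===== CLAIM (what is proved, stated in full; the proofs are below) =====
def Claim_equal_verificarListaAux : Prop := ∀ (lista : List Int) (pos : Int), Dom_verificarListaAux lista pos → Pre_verificarListaAux lista pos → Spec_verificarListaAux lista pos (verificarListaAux lista pos)

-- ===== LEMMAS AND PROOFS =====

theorem largoListaAux_eq (lista : List Int) : ∀ largo, largoListaAux lista largo = lista.length + largo := by
  induction lista with
  | nil => intro largo; simp [largoListaAux]
  | cons h t ih => intro largo; simp [largoListaAux, ih]; omega

theorem largoLista_eq (lista : List Int) : largoLista lista = lista.length := by
  simp [largoLista, largoListaAux_eq]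

-- one unfolding step of A when the index is in range
theorem verificar_step (lista : List Int) (pos : Int) (x : Int)
    (hne : ¬ largoLista lista = pos) (hget : PySem.List.pyGet? lista pos = some x) :
    verificarListaAux lista pos =
      (if x > 0 then verificarListaAux lista (pos + 1) else false) := by
  rw [verificarListaAux, if_neg hne]
  split
  · next heq => rw [hget] at heq; cases heq
  · next y heq => rw [hget] at heq; cases heq; rfl

theorem slice_from_nonneg (lista : List Int) (a : Int) (ha : 0 ≤ a) :
    PySem.List.slice lista (some a) none = lista.drop a.toNat := by
  have h : a = ((a.toNat : Nat) : Int) := by omega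
  rw [h, PySem.List.slice_from_natCast]
  simp
  omega

-- the alt on a nonnegative start is all-positive of the drop
theorem alt_nonneg (lista : List Int) (pos : Int) (h0 : 0 ≤ pos) :
    verificarListaAux_alt lista pos = (lista.drop pos.toNat).all (fun x => decide (0 < x)) := by
  simp only [verificarListaAux_alt, if_pos h0, slice_from_nonneg _ _ h0]

-- A on a nonnegative in-range pos computes all-positive of the suffix
theorem A_nonneg (lista : List Int) : ∀ d p : Nat, p + d = lista.length →
    verificarListaAux lista (p : Int) = (lista.drop p).all (fun x => decide (0 < x)) := by
  intro d
  induction d with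
  | zero =>
    intro p hd
    rw [verificarListaAux]
    have h1 : largoLista lista = (p : Int) := by rw [largoLista_eq]; omega
    have h2 : lista.drop p = [] := List.drop_eq_nil_of_le (by omega)
    simp [h1, h2]
  | succ k ih =>
    intro p hd
    have hlt : p < lista.length := by omega
    have hne : ¬ largoLista lista = (p : Int) := by rw [largoLista_eq]; omega
    have hget : PySem.List.pyGet? lista (p : Int) = some (lista[p]'hlt) := by
      rw [PySem.List.pyGet?_natCast, List.getElem?_eq_getElem hlt]
    rw [verificar_step lista (p : Int) _ hne hget]
    have hdrop : lista.drop p = lista[p]'hlt :: lista.drop (p + 1) :=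
      List.drop_eq_getElem_cons hlt
    by_cases hx : lista[p]'hlt > 0
    · have hc : ((p : Int) + 1) = (((p + 1 : Nat)) : Int) := by push_cast; ring
      rw [if_pos hx, hc, ih (p + 1) (by omega), hdrop, List.all_cons]
      simp [hx]
    · have hxf : decide (0 < lista[p]'hlt) = false := by
        simp only [not_lt] at hx; simp; omega
      rw [if_neg hx, hdrop, List.all_cons, hxf]
      simp

-- A on a negative in-range pos equals all-positive of the whole list
theorem A_neg (lista : List Int) : ∀ k : Nat, 0 < k → k ≤ lista.length →
    verificarListaAux lista (-(k : Int)) = lista.all (fun x => decide (0 < x)) := by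
  intro k
  induction k with
  | zero => omega
  | succ j ih =>
    intro _ hk
    have hne : ¬ largoLista lista = -((j + 1 : Nat) : Int) := by
      rw [largoLista_eq]; push_cast; omega
    have hidx : lista.length - (j + 1) < lista.length := by omega
    have hget : PySem.List.pyGet? lista (-((j + 1 : Nat) : Int)) = some (lista[lista.length - (j+1)]'hidx) := by
      have hq : PySem.List.pyGet? lista (-((j + 1 : Nat) : Int)) = lista[lista.length - (j+1)]? := by
        exact PySem.List.pyGet?_neg_natCast lista (j + 1) (by omega) (by omega)
      rw [hq, List.getElem?_eq_getElem hidx]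
    rw [verificar_step lista _ _ hne hget]
    have hmem : lista[lista.length - (j+1)]'hidx ∈ lista := List.getElem_mem _
    by_cases hpos : lista[lista.length - (j+1)]'hidx > 0
    · rw [if_pos hpos]
      have hstep : -((j + 1 : Nat) : Int) + 1 = -((j : Nat) : Int) := by push_cast; ring
      rcases Nat.eq_zero_or_pos j with hj | hj
      · subst hj
        rw [hstep]
        have h0 : -((0 : Nat) : Int) = ((0 : Nat) : Int) := by norm_num
        rw [h0, A_nonneg lista lista.length 0 (by omega), List.drop_zero]
      · rw [hstep, ih hj (by omega)]
    · rw [if_neg hpos]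
      simp only [not_lt] at hpos
      have hall : lista.all (fun x => decide (0 < x)) = false := by
        rw [List.all_eq_false]
        exact ⟨_, hmem, by simp; omega⟩
      rw [hall]

-- ===== VERDICT (by name: the statement is the Claim_ definition above) =====
theorem verificarListaAux_spec : Claim_equal_verificarListaAux := by
  intro lista pos _ hpre
  obtain ⟨hlo, hhi⟩ := hpre
  unfold Spec_verificarListaAux
  by_cases h0 : 0 ≤ pos
  · rw [alt_nonneg lista pos h0]
    have hp : pos = ((pos.toNat : Nat) : Int) := by omega
    conv_lhs => rw [hp]
    rw [A_nonneg lista (lista.length - pos.toNat) pos.toNat (by omega)]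
  · have halt : verificarListaAux_alt lista pos = lista.all (fun x => decide (0 < x)) := by
      simp only [verificarListaAux_alt, if_neg (by omega : ¬ pos ≥ 0)]
      rw [show (some (0 : Int)) = some (((0 : Nat)) : Int) by norm_num,
        PySem.List.slice_from_natCast]
      simp
    have hp : pos = -(((-pos).toNat : Nat) : Int) := by omega
    rw [halt, hp, A_neg lista (-pos).toNat (by omega) (by omega)]
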